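-- pv_equiv track=rewrite | github.com/hanjungwoo1/CodingTest | programmers/Level 1/신고결과받기.py | solution
-- ===== SOURCE A (Python) =====
-- def solution(id_list, report, k):
--     user = {}   # 신고 횟수 딕셔너리
--     name = {}   # 신고 결과 딕셔너리
--
--     # 딕셔너리 초기화, for count
--     for id in id_list:
--         user[id] = 0
--         name[id] = 0
--
--     # report map으로 중복제거
--     set_report = set(report)
--     report = list(set_report)
--
--     # 신고 당한 횟수 계산
--     for data in report:
--         _, second = data.split(' ')
--         user[second] += 1
--
--     # 각각 자신이 신고한 사람이 k를 넘었는지 판별, 신고 결과 만들기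
--     for data in report:
--         first, second = data.split(' ')
--         if user[second] >= k:
--             name[first] += 1
--
--     # 정답
--     answer = []
--
--     # for dictionary for loop
--     for k, v in name.items():
--         answer.append(v)
--
--     return answer
-- ===== SOURCE B (Python) =====
-- def solution(id_list, report, k):
--     # Dedupe reports into (reporter, victim) pairs once; no mutable count dicts.
--     pairs = {tuple(r.split(' ')) for r in report}
--     victims = [v for _, v in pairs]
--     banned = {v for v in victims if victims.count(v) >= k}
--     return [sum(1 for a, b in pairs if a == i and b in banned)
--             for i in dict.fromkeys(id_list)]
-- ===== Notes on version B (the rewrite author's own statement) =====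
-- stated objective: simpler
-- what changed: Instead of A's three dict-mutating passes over deduped report strings plus a values() pass, B dedupes reports once into (reporter, victim) pairs, derives the banned set by counting victims, and builds the answer directly as one comprehension over dict.fromkeys(id_list) counting each reporter's pairs whose victim is banned.
-- outside the precondition, e.g. on solution(['a', 'b'], ['c a'], 2): A returns [0, 0], B returns [0, 0]
import Mathlib
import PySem

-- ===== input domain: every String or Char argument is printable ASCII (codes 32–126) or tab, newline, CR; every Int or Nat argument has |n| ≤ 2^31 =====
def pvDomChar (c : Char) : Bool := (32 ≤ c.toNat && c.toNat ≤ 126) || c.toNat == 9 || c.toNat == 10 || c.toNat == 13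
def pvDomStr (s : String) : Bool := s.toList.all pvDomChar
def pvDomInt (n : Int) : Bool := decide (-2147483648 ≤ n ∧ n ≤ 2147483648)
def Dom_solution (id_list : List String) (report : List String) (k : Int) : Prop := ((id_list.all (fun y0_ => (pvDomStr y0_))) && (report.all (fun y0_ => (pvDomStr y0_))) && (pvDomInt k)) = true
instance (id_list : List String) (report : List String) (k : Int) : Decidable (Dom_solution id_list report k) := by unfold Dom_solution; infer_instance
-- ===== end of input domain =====

-- B replaces A's three dict-mutating passes with a deduped (reporter, victim) pair set, a counted
-- banned set and one count per id over the deduped id list; objective: simpler (not faster).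


-- shared tokenizer: r.split(' ') unpacked into (first, second); ("", "") where Python would raise (excluded by Pre_)
def pvSplit2 (s : String) : String × String :=
  match (PySem.Str.split? s " ").getD [] with
  | [a, b] => (a, b)
  | _ => ("", "")

-- ===== PORT A =====
def solution (id_list : List String) (report : List String) (k : Int) : List Int :=
  let user0 : PySem.Dict String Int := id_list.foldl (fun d id => d.insert id 0) PySem.Dict.empty
  let name0 : PySem.Dict String Int := id_list.foldl (fun d id => d.insert id 0) PySem.Dict.empty
  let rep : List String := PySem.Set.ofList report
  let user : PySem.Dict String Int :=
    rep.foldl (fun u data => u.insert (pvSplit2 data).2 (u.getD (pvSplit2 data).2 0 + 1)) user0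
  let name : PySem.Dict String Int :=
    rep.foldl (fun nm data =>
      if user.getD (pvSplit2 data).2 0 ≥ k then
        nm.insert (pvSplit2 data).1 (nm.getD (pvSplit2 data).1 0 + 1)
      else nm) name0
  name.items.foldl (fun answer kv => answer ++ [kv.2]) []

-- ===== PORT B =====
def solution_alt (id_list : List String) (report : List String) (k : Int) : List Int :=
  let pairs : PySem.Set (String × String) := PySem.Set.ofList (report.map pvSplit2)
  let victims : List String := pairs.map (fun p => p.2)
  let banned : PySem.Set String :=
    PySem.Set.ofList (victims.filter (fun v => (victims.count v : Int) ≥ k))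
  (PySem.List.dedup id_list).map (fun i =>
    pairs.foldl (fun acc p => if p.1 == i && PySem.Set.contains banned p.2 then acc + 1 else acc) (0 : Int))

-- ===== PRECONDITION & SPEC =====
-- Pre_ excludes reports that do not split into exactly two space-separated tokens (A raises
-- ValueError) or whose victim is absent from id_list (A raises KeyError); it is slightly narrower
-- than A's domain in also requiring the reporter to be in id_list, because A raises KeyError on an
-- unknown reporter only when that report's victim turns out banned, and returns all zeros otherwise.
def Pre_solution (id_list : List String) (report : List String) (k : Int) : Prop :=
  ∀ r ∈ report, PySem.Str.split? r " " = some [(pvSplit2 r).1, (pvSplit2 r).2] ∧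
    (pvSplit2 r).1 ∈ id_list ∧ (pvSplit2 r).2 ∈ id_list
instance (id_list : List String) (report : List String) (k : Int) : Decidable (Pre_solution id_list report k) := by unfold Pre_solution; infer_instance

def pvWitness_solution : List String × List String × Int :=
  (["muzi", "frodo", "apeach"], ["muzi frodo", "apeach frodo"], 2)

def Spec_solution (id_list : List String) (report : List String) (k : Int) (out : List Int) : Prop := out = solution_alt id_list report k
instance (id_list : List String) (report : List String) (k : Int) (out : List Int) : Decidable (Spec_solution id_list report k out) := by unfold Spec_solution; infer_instance

-- ===== CLAIM (what is proved, stated in full; the proofs are below) =====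
def Claim_equal_solution : Prop := ∀ (id_list : List String) (report : List String) (k : Int), Dom_solution id_list report k → Pre_solution id_list report k → Spec_solution id_list report k (solution id_list report k)

-- ===== LEMMAS AND PROOFS =====

-- joining pieces back with ' ': inverse of splitting on a single space
def pvJoin : List (List Char) → List Char
  | [] => []
  | [a] => a
  | a :: b :: t => a ++ ' ' :: pvJoin (b :: t)

theorem pvJoin_cons (a : List Char) (t : List (List Char)) (h : t ≠ []) :
    pvJoin (a :: t) = a ++ ' ' :: pvJoin t := by
  cases t with
  | nil => exact absurd rfl h
  | cons b t => rfl

theorem pvGo_spec : ∀ (fuel : Nat) (l cur : List Char) (accs : List (List Char)),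
    l.length < fuel →
    ∃ out, PySem.Chars.splitOn.go [' '] fuel l cur accs = accs.reverse ++ out ∧ out ≠ [] ∧
      pvJoin out = cur.reverse ++ l := by
  intro fuel
  induction fuel with
  | zero => intro l cur accs h; omega
  | succ f ih =>
      intro l cur accs h
      cases l with
      | nil =>
          refine ⟨[cur.reverse], ?_, by simp, by simp [pvJoin]⟩
          simp [PySem.Chars.splitOn.go]
      | cons c rest =>
          by_cases hc : c = ' '
          · subst hc
            have hlt : rest.length < f := by simpa using Nat.lt_of_succ_lt_succ h
            obtain ⟨out, h1, h2, h3⟩ := ih rest [] (cur.reverse :: accs) hlt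
            refine ⟨cur.reverse :: out, ?_, by simp, ?_⟩
            · rw [show PySem.Chars.splitOn.go [' '] (f+1) (' ' :: rest) cur accs
                    = PySem.Chars.splitOn.go [' '] f rest [] (cur.reverse :: accs) from by
                    simp [PySem.Chars.splitOn.go, List.isPrefixOf]]
              rw [h1]; simp
            · rw [pvJoin_cons _ _ h2, h3]; simp
          · have hlt : rest.length < f := by simpa using Nat.lt_of_succ_lt_succ h
            obtain ⟨out, h1, h2, h3⟩ := ih rest (c :: cur) accs hlt
            refine ⟨out, ?_, h2, ?_⟩
            · rw [show PySem.Chars.splitOn.go [' '] (f+1) (c :: rest) cur accs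
                    = PySem.Chars.splitOn.go [' '] f rest (c :: cur) accs from by
                    simp [PySem.Chars.splitOn.go, List.isPrefixOf, (Ne.symm hc)]]
              exact h1
            · rw [h3]; simp

theorem pvSplit_join (s : List Char) :
    pvJoin (PySem.Chars.splitOn s [' ']) = s := by
  obtain ⟨out, h1, -, h3⟩ := pvGo_spec (s.length + 1) s [] [] (by omega)
  rw [PySem.Chars.splitOn, h1]
  simpa using h3

theorem pvToListSplit (r a b : String)
    (hr : PySem.Str.split? r " " = some [a, b]) :
    r.toList = a.toList ++ ' ' :: b.toList := by
  rw [PySem.Str.split?] at hr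
  have hsep : (" " : String).toList = [' '] := rfl
  rw [hsep] at hr
  rw [PySem.Chars.split?] at hr
  simp at hr
  have hj := pvSplit_join r.toList
  rcases hmap : PySem.Chars.splitOn r.toList [' '] with _ | ⟨x, _ | ⟨y, _ | _⟩⟩ <;>
    rw [hmap] at hr hj <;> simp at hr
  · obtain ⟨hx, hy⟩ := hr
    rw [show pvJoin [x, y] = x ++ ' ' :: y from rfl] at hj
    rw [← hj, ← hx, ← hy]
    simp [String.toList_ofList]

theorem pvSplit2_inj (r s : String) (a b : String)
    (hr : PySem.Str.split? r " " = some [a, b]) (hs : PySem.Str.split? s " " = some [a, b]) :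
    r = s := by
  have := (pvToListSplit r a b hr).trans (pvToListSplit s a b hs).symm
  exact String.toList_inj.mp this

theorem pvOfList_map_injOn (l : List String)
    (h : ∀ x ∈ l, ∀ y ∈ l, pvSplit2 x = pvSplit2 y → x = y) :
    PySem.Set.ofList (l.map pvSplit2) = (PySem.Set.ofList l).map pvSplit2 := by
  induction l using List.reverseRecOn with
  | nil => rfl
  | append_singleton t x ih =>
      have ht : ∀ a ∈ t, ∀ b ∈ t, pvSplit2 a = pvSplit2 b → a = b :=
        fun a ha b hb => h a (by simp [ha]) b (by simp [hb])
      rw [List.map_append, List.map_singleton, PySem.Set.ofList_append_singleton,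
          PySem.Set.ofList_append_singleton, ih ht, PySem.Set.add_eq_ite, PySem.Set.add_eq_ite]
      by_cases hx : x ∈ PySem.Set.ofList t
      · rw [if_pos hx, if_pos (by simpa using ⟨x, by simpa using hx, rfl⟩)]
      · rw [if_neg hx, if_neg ?_, List.map_append, List.map_singleton]
        intro hmem
        rw [List.mem_map] at hmem
        obtain ⟨y, hy, hfy⟩ := hmem
        have hyt : y ∈ t := (PySem.Set.mem_ofList _ _).mp hy
        have := h y (by simp [hyt]) x (by simp) hfy
        exact hx (this ▸ hy)

theorem pvZeroDict (l : List String) (d : PySem.Dict String Int)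
    (h : ∀ v, d.getD v 0 = 0) (v : String) :
    (l.foldl (fun d i => d.insert i 0) d).getD v 0 = 0 := by
  induction l generalizing d with
  | nil => exact h v
  | cons x t ih =>
      refine ih _ (fun w => ?_)
      rw [PySem.Dict.getD_insert]
      split_ifs <;> simp [h]

-- A's answer: per id (in deduped id_list order), the number of distinct report strings whose
-- reporter is that id and whose victim was reported (distinctly) at least k times
theorem pvA_char (id_list report : List String) (k : Int)
    (hpre : ∀ r ∈ report, (pvSplit2 r).1 ∈ id_list) :
    solution id_list report k =
      (PySem.Set.ofList id_list).map (fun i =>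
        ((((PySem.Set.ofList report).filter
            (fun r => decide ((((PySem.Set.ofList report).map (fun t => (pvSplit2 t).2)).count (pvSplit2 r).2 : Int) ≥ k))).map
          (fun r => (pvSplit2 r).1)).count i : Int)) := by
  unfold solution
  dsimp only
  have huser : ∀ v, ((PySem.Set.ofList report).foldl
      (fun u data => u.insert (pvSplit2 data).2 (u.getD (pvSplit2 data).2 0 + 1))
      (id_list.foldl (fun d id => d.insert id 0) PySem.Dict.empty)).getD v 0
      = (((PySem.Set.ofList report).map (fun t => (pvSplit2 t).2)).count v : Int) := by
    intro v
    rw [← List.foldl_map (f := fun data => (pvSplit2 data).2)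
        (g := fun (u : PySem.Dict String Int) (x : String) => u.insert x (u.getD x 0 + 1))]
    rw [PySem.Dict.getD_foldl_insert_add_one]
    rw [pvZeroDict _ _ (fun w => by simp [PySem.Dict.getD_empty])]
    ring
  simp only [huser]
  rw [PySem.List.foldl_ite_eq_foldl_filter
      (p := fun data => (((PySem.Set.ofList report).map (fun t => (pvSplit2 t).2)).count (pvSplit2 data).2 : Int) ≥ k)]
  set flt := (PySem.Set.ofList report).filter
      (fun r => decide ((((PySem.Set.ofList report).map (fun t => (pvSplit2 t).2)).count (pvSplit2 r).2 : Int) ≥ k)) with hflt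
  have hk0 : (id_list.foldl (fun d id => d.insert id 0) (PySem.Dict.empty : PySem.Dict String Int)).keys
      = PySem.Set.ofList id_list := by
    rw [PySem.Dict.keys_foldl_insert _ (fun _ _ => 0)]
    simp [pysem]
  have hkeys : ((flt.foldl
      (fun nm data => nm.insert (pvSplit2 data).1 (nm.getD (pvSplit2 data).1 0 + 1))
      (id_list.foldl (fun d id => d.insert id 0) (PySem.Dict.empty : PySem.Dict String Int)))).keys
      = PySem.Set.ofList id_list := by
    rw [PySem.Dict.keys_foldl_insert_key _ (fun data => (pvSplit2 data).1)]
    rw [hk0]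
    rw [PySem.Set.update_eq_append_filter]
    have : (List.filter (fun y => !(PySem.Set.ofList id_list).contains y)
        (PySem.Set.ofList (flt.map (fun data => (pvSplit2 data).1)))) = [] := by
      rw [List.filter_eq_nil_iff]
      intro y hy
      have hy' : y ∈ flt.map (fun data => (pvSplit2 data).1) := (PySem.Set.mem_ofList _ _).mp hy
      rw [List.mem_map] at hy'
      obtain ⟨r, hr, rfl⟩ := hy'
      have hrrep : r ∈ report := by
        have : r ∈ PySem.Set.ofList report := List.mem_of_mem_filter (hflt ▸ hr)
        exact (PySem.Set.mem_ofList _ _).mp this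
      simp [PySem.Set.contains_eq_listContains,
        (PySem.Set.mem_ofList id_list _).mpr (hpre r hrrep)]
    rw [this, List.append_nil]
  have hnodup : ((flt.foldl
      (fun nm data => nm.insert (pvSplit2 data).1 (nm.getD (pvSplit2 data).1 0 + 1))
      (id_list.foldl (fun d id => d.insert id 0) (PySem.Dict.empty : PySem.Dict String Int)))).keys.Nodup := by
    rw [hkeys]; exact PySem.Set.nodup_ofList _
  rw [PySem.List.foldl_append_singleton_eq_map]
  rw [PySem.Dict.items_eq_map_keys _ hnodup 0]
  simp only [hkeys]
  rw [List.nil_append, List.map_map]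
  apply List.map_congr_left
  intro i hi
  simp only [Function.comp]
  rw [← List.foldl_map (f := fun data => (pvSplit2 data).1)
      (g := fun (d : PySem.Dict String Int) (x : String) => d.insert x (d.getD x 0 + 1))]
  rw [PySem.Dict.getD_foldl_insert_add_one]
  rw [pvZeroDict _ _ (fun w => by simp [PySem.Dict.getD_empty])]
  ring

-- B's answer, rewritten to the same normal form
theorem pvB_char (id_list report : List String) (k : Int)
    (hinj : ∀ x ∈ report, ∀ y ∈ report, pvSplit2 x = pvSplit2 y → x = y) :
    solution_alt id_list report k =
      (PySem.Set.ofList id_list).map (fun i =>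
        ((((PySem.Set.ofList report).filter
            (fun r => decide ((((PySem.Set.ofList report).map (fun t => (pvSplit2 t).2)).count (pvSplit2 r).2 : Int) ≥ k))).map
          (fun r => (pvSplit2 r).1)).count i : Int)) := by
  unfold solution_alt
  dsimp only
  rw [PySem.List.dedup_eq_ofList]
  have hpairs : PySem.Set.ofList (report.map pvSplit2) = (PySem.Set.ofList report).map pvSplit2 :=
    pvOfList_map_injOn _ hinj
  simp only [hpairs, List.map_map]
  apply List.map_congr_left
  intro i hi
  rw [PySem.List.foldl_if_add_one]
  rw [List.count_eq_countP, List.countP_map, List.countP_map, List.countP_filter]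
  rw [zero_add]
  congr 1
  simp only [Function.comp_def]
  apply List.countP_congr
  intro r hr
  have hmem : (pvSplit2 r).2 ∈ (PySem.Set.ofList report).map (fun x => (pvSplit2 x).2) :=
    List.mem_map.mpr ⟨r, hr, rfl⟩
  simp only [Bool.and_eq_true, decide_eq_true_eq]
  constructor
  · rintro ⟨h1, h2⟩
    refine ⟨h1, ?_⟩
    rw [PySem.Set.contains_iff] at h2
    simp only [PySem.Set.mem_ofList, List.mem_filter, decide_eq_true_eq] at h2
    exact h2.2
  · rintro ⟨h1, h2⟩
    refine ⟨h1, ?_⟩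
    rw [PySem.Set.contains_iff]
    simp only [PySem.Set.mem_ofList, List.mem_filter, decide_eq_true_eq]
    exact ⟨hmem, h2⟩

-- ===== VERDICT (by name: the statement is the Claim_ definition above) =====
theorem solution_spec : Claim_equal_solution := by
  intro id_list report k _hdom hpre
  unfold Spec_solution
  have hfst : ∀ r ∈ report, (pvSplit2 r).1 ∈ id_list := fun r hr => (hpre r hr).2.1
  have hinj : ∀ x ∈ report, ∀ y ∈ report, pvSplit2 x = pvSplit2 y → x = y := by
    intro x hx y hy hxy
    refine pvSplit2_inj x y (pvSplit2 x).1 (pvSplit2 x).2 (hpre x hx).1 ?_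
    rw [hxy]
    exact (hpre y hy).1
  rw [pvA_char _ _ _ hfst, pvB_char _ _ _ hinj]
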